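-- pv_equiv track=rewrite | github.com/b1mango/StreamVerse | scripts/douyin_bridge.py | choose_direct_url
-- ===== SOURCE A (Python) =====
-- def choose_direct_url(url_list: list[str]) -> str | None:
--     if not url_list:
--         return None
--
--     for item in url_list:
--         lowered = item.lower()
--         if "audio" in lowered and "/video/" not in lowered:
--             continue
--         if item.endswith(".mp4") or "/video/" in item or "aweme/v1/play/" in item:
--             return item
--
--     for item in url_list:
--         lowered = item.lower()
--         if "audio" not in lowered:
--             return item
--
--     return url_list[0]
-- ===== SOURCE B (Python) =====
-- def choose_direct_url(url_list: list[str]) -> str | None: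
--     if not url_list:
--         return None
--     first_non_audio = None
--     for item in url_list:
--         lowered = item.lower()
--         is_audio = "audio" in lowered
--         if (item.endswith(".mp4") or "/video/" in item or "aweme/v1/play/" in item) \
--                 and not (is_audio and "/video/" not in lowered):
--             return item
--         if first_non_audio is None and not is_audio:
--             first_non_audio = item
--     return first_non_audio if first_non_audio is not None else url_list[0]
-- ===== Notes on version B (the rewrite author's own statement) =====
-- stated objective: alternative
-- what changed: Fuses A's two sequential scans into a single pass that returns a primary match immediately and meanwhile records the first non-audio item as the fallback, trading A's two-pass structure for one loop with an accumulator.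
import Mathlib
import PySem

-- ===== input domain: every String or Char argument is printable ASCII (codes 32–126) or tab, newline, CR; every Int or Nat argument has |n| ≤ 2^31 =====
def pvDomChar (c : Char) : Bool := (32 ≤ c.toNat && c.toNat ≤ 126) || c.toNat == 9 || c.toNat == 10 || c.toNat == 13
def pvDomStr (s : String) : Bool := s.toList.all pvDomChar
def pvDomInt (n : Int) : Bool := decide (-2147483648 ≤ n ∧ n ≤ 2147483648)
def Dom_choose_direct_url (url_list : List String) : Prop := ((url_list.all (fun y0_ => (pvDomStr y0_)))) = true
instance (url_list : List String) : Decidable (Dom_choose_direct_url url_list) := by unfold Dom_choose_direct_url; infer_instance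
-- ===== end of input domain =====

-- B fuses A's two scans into one pass (early return on a primary match, first
-- non-audio item recorded as the fallback); objective: alternative decomposition.

-- ===== PORT A =====
-- first loop of A: skip audio-non-video items, return the first primary match
def cduPass1 : List String → Option String
  | [] => none
  | item :: rest =>
    let lowered := PySem.Str.lower item
    if PySem.Str.isIn "audio" lowered && !(PySem.Str.isIn "/video/" lowered) then
      cduPass1 rest
    else if PySem.Str.endswith item ".mp4" || PySem.Str.isIn "/video/" item
            || PySem.Str.isIn "aweme/v1/play/" item then
      some item
    else
      cduPass1 rest

-- second loop of A: first item whose lowering lacks "audio"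
def cduPass2 : List String → Option String
  | [] => none
  | item :: rest =>
    if !(PySem.Str.isIn "audio" (PySem.Str.lower item)) then some item else cduPass2 rest

def choose_direct_url (url_list : List String) : Option String :=
  match url_list with
  | [] => none
  | first :: _ =>
    match cduPass1 url_list with
    | some r => some r
    | none =>
      match cduPass2 url_list with
      | some r => some r
      | none => some first

-- ===== PORT B =====
-- single fused loop: early return on primary match, accumulate first non-audio fallback
def cduLoop : List String → Option String → String → Option String
  | [], fallback, first => some (fallback.getD first)
  | item :: rest, fallback, first =>
    let lowered := PySem.Str.lower item
    let isAudio := PySem.Str.isIn "audio" lowered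
    if (PySem.Str.endswith item ".mp4" || PySem.Str.isIn "/video/" item
        || PySem.Str.isIn "aweme/v1/play/" item)
       && !(isAudio && !(PySem.Str.isIn "/video/" lowered)) then
      some item
    else
      cduLoop rest (if fallback.isNone && !isAudio then some item else fallback) first

def choose_direct_url_alt (url_list : List String) : Option String :=
  match url_list with
  | [] => none
  | first :: _ => cduLoop url_list none first

-- ===== PRECONDITION & SPEC =====
def Spec_choose_direct_url (url_list : List String) (out : Option String) : Prop := out = choose_direct_url_alt url_list
instance (url_list : List String) (out : Option String) : Decidable (Spec_choose_direct_url url_list out) := by unfold Spec_choose_direct_url; infer_instance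

-- ===== CLAIM (what is proved, stated in full; the proofs are below) =====
def Claim_equal_choose_direct_url : Prop := ∀ (url_list : List String), Dom_choose_direct_url url_list → Spec_choose_direct_url url_list (choose_direct_url url_list)

-- ===== LEMMAS AND PROOFS =====

-- the fused loop equals: pass-1 result, else the pending fallback, else pass-2, else first
theorem cduLoop_eq (l : List String) (fb : Option String) (f : String) :
    cduLoop l fb f =
      match cduPass1 l with
      | some r => some r
      | none =>
        match fb with
        | some x => some x
        | none =>
          match cduPass2 l with
          | some r => some r
          | none => some f := by
  induction l generalizing fb with
  | nil => cases fb <;> simp [cduLoop, cduPass1, cduPass2]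
  | cons item rest ih =>
    simp only [cduLoop, cduPass1, cduPass2]
    cases hA : PySem.Str.isIn "audio" (PySem.Str.lower item) <;>
      cases hV : PySem.Str.isIn "/video/" (PySem.Str.lower item) <;>
      cases hP : (PySem.Str.endswith item ".mp4" || PySem.Str.isIn "/video/" item
          || PySem.Str.isIn "aweme/v1/play/" item) <;>
      simp only [Bool.or_eq_true, PySem.Str.endswith_eq, PySem.Str.isIn_eq, Bool.not_eq_true'] at hP <;>
      cases fb <;>
      simp [hA, hV, hP, ih, not_or]

-- ===== VERDICT (by name: the statement is the Claim_ definition above) =====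
theorem choose_direct_url_spec : Claim_equal_choose_direct_url := by
  intro url_list _
  unfold Spec_choose_direct_url choose_direct_url choose_direct_url_alt
  cases url_list with
  | nil => rfl
  | cons first rest =>
    dsimp only
    rw [cduLoop_eq]
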